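-- pv_equiv track=rewrite | github.com/blackhat-coder21/BDA | app.py | is_domestic_flight
-- ===== SOURCE A (Python) =====
-- def is_domestic_flight(origin: str, destination: str) -> bool:
--     """Determine if flight is domestic (simplified country mapping)"""
--     country_airports = {
--         'US': ['JFK', 'LAX', 'ORD', 'ATL', 'DEN', 'DFW', 'SFO', 'SEA', 'BOS', 'MIA',
--                'MCO', 'LAS', 'PHX', 'IAH', 'MSP', 'DTW', 'CLT', 'LGA', 'EWR', 'SAN'],
--         'CA': ['YYZ', 'YVR', 'YUL', 'YYC', 'YEG', 'YOW'],
--         'GB': ['LHR', 'LGW', 'STN'],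
--         'FR': ['CDG', 'ORY'],
--         'DE': ['FRA', 'MUC', 'DUS'],
--         'JP': ['NRT', 'HND', 'KIX'],
--         'CN': ['PEK', 'PVG', 'SHA', 'CAN', 'SZX', 'CTU'],
--         'AU': ['SYD', 'MEL', 'BNE', 'PER', 'ADL']
--     }
--
--     for country, airports in country_airports.items():
--         if origin in airports and destination in airports:
--             return True
--     return False
-- ===== SOURCE B (Python) =====
-- # Flat reverse index: airport code -> numeric country id, built once as a literal table;
-- # the check becomes two dict lookups and an id comparison (no per-country loop, no country-name strings).
-- _COUNTRY_ID = {
--     # US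
--     'JFK': 0, 'LAX': 0, 'ORD': 0, 'ATL': 0, 'DEN': 0, 'DFW': 0, 'SFO': 0, 'SEA': 0, 'BOS': 0, 'MIA': 0,
--     'MCO': 0, 'LAS': 0, 'PHX': 0, 'IAH': 0, 'MSP': 0, 'DTW': 0, 'CLT': 0, 'LGA': 0, 'EWR': 0, 'SAN': 0,
--     # CA
--     'YYZ': 1, 'YVR': 1, 'YUL': 1, 'YYC': 1, 'YEG': 1, 'YOW': 1,
--     # GB
--     'LHR': 2, 'LGW': 2, 'STN': 2,
--     # FR
--     'CDG': 3, 'ORY': 3,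
--     # DE
--     'FRA': 4, 'MUC': 4, 'DUS': 4,
--     # JP
--     'NRT': 5, 'HND': 5, 'KIX': 5,
--     # CN
--     'PEK': 6, 'PVG': 6, 'SHA': 6, 'CAN': 6, 'SZX': 6, 'CTU': 6,
--     # AU
--     'SYD': 7, 'MEL': 7, 'BNE': 7, 'PER': 7, 'ADL': 7,
-- }
--
-- def is_domestic_flight(origin: str, destination: str) -> bool:
--     co = _COUNTRY_ID.get(origin)
--     return co is not None and co == _COUNTRY_ID.get(destination)
-- ===== Notes on version B (the rewrite author's own statement) =====
-- stated objective: simpler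
-- what changed: Replaces the per-country loop with two membership scans by a flat reverse-index table (airport code -> numeric country id) built once as a literal, so the check is two dict lookups and one id comparison guarded against both codes being missing.
import Mathlib
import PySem

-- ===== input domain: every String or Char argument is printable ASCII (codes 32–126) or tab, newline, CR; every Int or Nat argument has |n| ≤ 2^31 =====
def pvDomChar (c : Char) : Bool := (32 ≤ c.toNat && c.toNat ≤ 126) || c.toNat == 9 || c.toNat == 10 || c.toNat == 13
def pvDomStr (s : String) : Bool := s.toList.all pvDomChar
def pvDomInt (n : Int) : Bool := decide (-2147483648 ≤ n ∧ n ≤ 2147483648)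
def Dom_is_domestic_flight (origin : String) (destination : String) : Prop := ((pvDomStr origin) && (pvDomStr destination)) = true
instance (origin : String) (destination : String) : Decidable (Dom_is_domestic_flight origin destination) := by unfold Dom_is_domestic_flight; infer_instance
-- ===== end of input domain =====

-- B replaces A's per-country scan by a flat literal reverse index (code → numeric country id) with two lookups; return values proved equal.

-- ===== PORT A =====
-- the dict literal country_airports (insertion order)
def pvCountryAirports : List (String × List String) :=
  [("US", ["JFK", "LAX", "ORD", "ATL", "DEN", "DFW", "SFO", "SEA", "BOS", "MIA",
           "MCO", "LAS", "PHX", "IAH", "MSP", "DTW", "CLT", "LGA", "EWR", "SAN"]),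
   ("CA", ["YYZ", "YVR", "YUL", "YYC", "YEG", "YOW"]),
   ("GB", ["LHR", "LGW", "STN"]),
   ("FR", ["CDG", "ORY"]),
   ("DE", ["FRA", "MUC", "DUS"]),
   ("JP", ["NRT", "HND", "KIX"]),
   ("CN", ["PEK", "PVG", "SHA", "CAN", "SZX", "CTU"]),
   ("AU", ["SYD", "MEL", "BNE", "PER", "ADL"])]

-- A: loop over items, early-return True when both codes are members ( = List.any )
def is_domestic_flight (origin : String) (destination : String) : Bool :=
  pvCountryAirports.any (fun p => p.2.contains origin && p.2.contains destination)

-- ===== PORT B =====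
-- the flat literal dict _COUNTRY_ID (code → numeric country id); lookup = first match
def pvCountryId : List (String × Int) :=
  [("JFK", 0), ("LAX", 0), ("ORD", 0), ("ATL", 0), ("DEN", 0), ("DFW", 0), ("SFO", 0),
   ("SEA", 0), ("BOS", 0), ("MIA", 0), ("MCO", 0), ("LAS", 0), ("PHX", 0), ("IAH", 0),
   ("MSP", 0), ("DTW", 0), ("CLT", 0), ("LGA", 0), ("EWR", 0), ("SAN", 0),
   ("YYZ", 1), ("YVR", 1), ("YUL", 1), ("YYC", 1), ("YEG", 1), ("YOW", 1),
   ("LHR", 2), ("LGW", 2), ("STN", 2),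
   ("CDG", 3), ("ORY", 3),
   ("FRA", 4), ("MUC", 4), ("DUS", 4),
   ("NRT", 5), ("HND", 5), ("KIX", 5),
   ("PEK", 6), ("PVG", 6), ("SHA", 6), ("CAN", 6), ("SZX", 6), ("CTU", 6),
   ("SYD", 7), ("MEL", 7), ("BNE", 7), ("PER", 7), ("ADL", 7)]

-- B: co = _COUNTRY_ID.get(origin); co is not None and co == _COUNTRY_ID.get(destination)
def is_domestic_flight_alt (origin : String) (destination : String) : Bool :=
  match pvCountryId.lookup origin with
  | none => false
  | some co => pvCountryId.lookup destination == some co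

-- ===== PRECONDITION & SPEC =====
def Spec_is_domestic_flight (origin : String) (destination : String) (out : Bool) : Prop := out = is_domestic_flight_alt origin destination
instance (origin : String) (destination : String) (out : Bool) : Decidable (Spec_is_domestic_flight origin destination out) := by unfold Spec_is_domestic_flight; infer_instance

-- ===== CLAIM (what is proved, stated in full; the proofs are below) =====
def Claim_equal_is_domestic_flight : Prop := ∀ (origin : String) (destination : String), Dom_is_domestic_flight origin destination → Spec_is_domestic_flight origin destination (is_domestic_flight origin destination)

-- ===== LEMMAS AND PROOFS =====

-- the id-tagged version of A's table: same code lists, country names replaced by their index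
def pvIdTable : List (Int × List String) :=
  pvCountryAirports.zipIdx.map (fun p => ((p.2 : Int), p.1.2))

-- lookup in a constant-valued map list is a membership test
theorem pv_lookup_map_const {α : Type} [BEq α] (codes : List String) (v : α) (o : String) :
    (codes.map (fun c => (c, v))).lookup o = if codes.contains o then some v else none := by
  induction codes with
  | nil => rfl
  | cons c cs ih =>
    by_cases h : (o == c) = true
    · have h' : o = c := by simpa using h
      simp [h']
    · have h' : ¬ o = c := by simpa using h
      simp [List.lookup, h, h', ih]

-- lookup in the flattened reverse index = tag of the first entry whose code list contains o
theorem pv_lookup_flatMap {α : Type} [BEq α] (L : List (α × List String)) (o : String) :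
    (L.flatMap (fun p => p.2.map (fun code => (code, p.1)))).lookup o
      = (L.find? (fun p => p.2.contains o)).map Prod.fst := by
  induction L with
  | nil => rfl
  | cons p L ih =>
    simp only [List.flatMap_cons, List.lookup_append, pv_lookup_map_const, List.find?_cons]
    by_cases h : o ∈ p.2
    · simp [h]
    · simp [h, ih]

-- the generic equivalence: with globally unique codes and distinct tags,
-- "some entry contains both" = "first entry containing o has the same tag as first entry containing d"
theorem pv_any_eq_find {α : Type} [BEq α] [LawfulBEq α] [DecidableEq α] (L : List (α × List String))
    (hdis : L.Pairwise (fun p q => ∀ x ∈ p.2, ¬ x ∈ q.2))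
    (hnodup : (L.map Prod.fst).Nodup) (o d : String) :
    L.any (fun p => p.2.contains o && p.2.contains d)
      = (match (L.find? (fun p => p.2.contains o)).map Prod.fst with
         | none => false
         | some co => (L.find? (fun p => p.2.contains d)).map Prod.fst == some co) := by
  have hsymm : Symmetric (fun p q : α × List String => ∀ x ∈ p.2, ¬ x ∈ q.2) := by
    intro p q h x hxq hxp; exact h x hxp hxq
  cases h1 : L.find? (fun p => p.2.contains o) with
  | none =>
    have hA : (L.any fun p => p.2.contains o && p.2.contains d) = false := by
      rw [List.any_eq_false]
      intro p hp
      simp only [Bool.and_eq_true, not_and]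
      intro ho _
      exact absurd ho (by simpa using List.find?_eq_none.mp h1 p hp)
    rw [hA]
    rfl
  | some p1 =>
    have hp1m : p1 ∈ L := List.mem_of_find?_eq_some h1
    have hp1o : o ∈ p1.2 := by simpa using List.find?_some h1
    cases h2 : L.find? (fun p => p.2.contains d) with
    | none =>
      have hA : (L.any fun p => p.2.contains o && p.2.contains d) = false := by
        rw [List.any_eq_false]
        intro p hp
        simp only [Bool.and_eq_true, not_and]
        intro _ hd
        exact absurd hd (by simpa using List.find?_eq_none.mp h2 p hp)
      rw [hA]
      rfl
    | some p2 =>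
      have hp2m : p2 ∈ L := List.mem_of_find?_eq_some h2
      have hp2d : d ∈ p2.2 := by simpa using List.find?_some h2
      simp only [Option.map_some]
      by_cases hco : p2.1 = p1.1
      · have hp12 : p2 = p1 := List.inj_on_of_nodup_map hnodup hp2m hp1m hco
        have hA : (L.any fun p => p.2.contains o && p.2.contains d) = true :=
          List.any_eq_true.mpr ⟨p1, hp1m, by
            simp only [Bool.and_eq_true, List.contains_eq_mem, decide_eq_true_eq]
            exact ⟨hp1o, hp12 ▸ hp2d⟩⟩
        rw [hA, hco]
        simp
      · have hA : (L.any fun p => p.2.contains o && p.2.contains d) = false := by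
          rw [List.any_eq_false]
          intro p hp
          simp only [Bool.and_eq_true, List.contains_eq_mem, decide_eq_true_eq, not_and]
          intro hpo hpd
          have e1 : p = p1 := by
            by_contra hne
            exact List.Pairwise.forall hsymm hdis hp hp1m hne o hpo hp1o
          have e2 : p = p2 := by
            by_contra hne
            exact List.Pairwise.forall hsymm hdis hp hp2m hne d hpd hp2d
          exact hco (by rw [← e2, e1])
        rw [hA]
        symm
        simp [hco]

-- B's literal flat table is exactly the flattening of the id-tagged table
theorem pv_table_eq :
    pvCountryId = pvIdTable.flatMap (fun p => p.2.map (fun code => (code, p.1))) := by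
  decide

-- anys that only inspect the second component factor through map Prod.snd
theorem pv_any_snd {β : Type} (L : List (β × List String)) (Q : List String → Bool) :
    L.any (fun p => Q p.2) = (L.map Prod.snd).any Q := by
  rw [List.any_map]; rfl

-- A's any over pvCountryAirports only looks at the code lists, so it equals the same any over pvIdTable
theorem pv_any_eq (origin destination : String) :
    pvCountryAirports.any (fun p => p.2.contains origin && p.2.contains destination)
      = pvIdTable.any (fun p => p.2.contains origin && p.2.contains destination) := by
  calc pvCountryAirports.any (fun p => p.2.contains origin && p.2.contains destination)
      = (pvCountryAirports.map Prod.snd).any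
          (fun l => l.contains origin && l.contains destination) :=
        pv_any_snd pvCountryAirports (fun l => l.contains origin && l.contains destination)
    _ = (pvIdTable.map Prod.snd).any
          (fun l => l.contains origin && l.contains destination) := by
        rw [show pvCountryAirports.map Prod.snd = pvIdTable.map Prod.snd from by decide]
    _ = pvIdTable.any (fun p => p.2.contains origin && p.2.contains destination) :=
        (pv_any_snd pvIdTable (fun l => l.contains origin && l.contains destination)).symm

-- ===== VERDICT (by name: the statement is the Claim_ definition above) =====
theorem is_domestic_flight_spec : Claim_equal_is_domestic_flight := by
  intro origin destination _
  unfold Spec_is_domestic_flight is_domestic_flight is_domestic_flight_alt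
  rw [pv_table_eq, pv_lookup_flatMap, pv_lookup_flatMap, pv_any_eq]
  rw [pv_any_eq_find pvIdTable (by decide) (by decide) origin destination]
  cases (List.find? (fun p => p.2.contains origin) pvIdTable).map Prod.fst <;> rfl
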